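-- pv_equiv track=rewrite | github.com/CoderWang101/MacCode-master | MacCode-master/2024/11/28/5.货轮.py | max_load_items
-- ===== SOURCE A (Python) =====
-- def max_load_items(items, capacity):
--     # 对集装箱按质量进行排序
--     sorted_items = sorted(items)
--
--     total_weight = 0
--     selected_items = []
--
--     # 装载集装箱
--     for item in sorted_items:
--         if total_weight + item <= capacity:
--             total_weight += item
--             selected_items.append(item)
--         else:
--             break
--
--     return selected_items
-- ===== SOURCE B (Python) =====
-- def max_load_items(items, capacity):
--     # Selection-based greedy: no sorting pass at all; repeatedly extract the
--     # minimum of the remaining pool while it still fits the leftover capacity.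
--     remaining = list(items)
--     selected = []
--     while remaining:
--         m = min(remaining)
--         if m > capacity:
--             break
--         remaining.remove(m)
--         selected.append(m)
--         capacity -= m
--     return selected
-- ===== Notes on version B (the rewrite author's own statement) =====
-- stated objective: alternative
-- what changed: Drops the sort entirely: instead of sorting and scanning a prefix with a running total, B repeatedly extracts the minimum of the remaining pool (selection-style) while it fits the leftover capacity, which it decrements in place.
import Mathlib
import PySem

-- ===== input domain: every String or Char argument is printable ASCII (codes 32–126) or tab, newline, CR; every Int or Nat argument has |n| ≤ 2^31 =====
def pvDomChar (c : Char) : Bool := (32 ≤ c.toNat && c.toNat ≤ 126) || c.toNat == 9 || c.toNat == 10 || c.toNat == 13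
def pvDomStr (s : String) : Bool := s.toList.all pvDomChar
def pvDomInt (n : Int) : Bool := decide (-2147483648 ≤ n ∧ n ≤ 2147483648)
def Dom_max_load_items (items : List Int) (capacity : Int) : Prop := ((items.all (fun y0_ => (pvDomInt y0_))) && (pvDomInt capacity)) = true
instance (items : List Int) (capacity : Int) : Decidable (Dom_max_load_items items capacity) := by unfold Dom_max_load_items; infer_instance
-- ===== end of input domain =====

-- B replaces sort-then-prefix-scan by selection: repeatedly extract the minimum of the
-- remaining pool while it fits the leftover capacity; return-value equivalence only.

-- ===== PORT A =====
-- the for-loop with break, carrying total_weight and selected_items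
def mlLoopA (cap : Int) : List Int → Int → List Int → List Int
  | [], _, sel => sel
  | x :: xs, total, sel =>
    if total + x ≤ cap then mlLoopA cap xs (total + x) (sel ++ [x])
    else sel

def max_load_items (items : List Int) (capacity : Int) : List Int :=
  mlLoopA capacity (PySem.List.sorted items (fun x => x)) 0 []

-- ===== PORT B =====
-- the while-loop: m = min(remaining); stop if m > capacity; else remove m,
-- append it, and decrement capacity.  Terminates because remove shortens the pool.
def mlLoopB (remaining : List Int) (cap : Int) (sel : List Int) : List Int :=
  match hm : PySem.List.min? remaining (fun x => x) with
  | none => sel                                    -- remaining is empty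
  | some m =>
    if m > cap then sel
    else
      match hr : PySem.List.remove? remaining m with
      | none => sel                                -- unreachable: m ∈ remaining
      | some r => mlLoopB r (cap - m) (sel ++ [m])
termination_by remaining.length
decreasing_by
  have hmem : m ∈ remaining := PySem.List.min?_mem hm
  have hre : PySem.List.remove? remaining m = some (remaining.erase m) :=
    PySem.List.remove?_eq_some_erase remaining m hmem
  have hr2 : r = remaining.erase m := by rw [hre] at hr; exact (Option.some_inj.mp hr).symm
  have hlen := List.length_erase_of_mem hmem
  have hpos : 0 < remaining.length := List.length_pos_of_mem hmem
  rw [hr2, hlen]; omega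

def max_load_items_alt (items : List Int) (capacity : Int) : List Int :=
  mlLoopB items capacity []

-- ===== PRECONDITION & SPEC =====
def Spec_max_load_items (items : List Int) (capacity : Int) (out : List Int) : Prop := out = max_load_items_alt items capacity
instance (items : List Int) (capacity : Int) (out : List Int) : Decidable (Spec_max_load_items items capacity out) := by unfold Spec_max_load_items; infer_instance

-- ===== CLAIM (what is proved, stated in full; the proofs are below) =====
def Claim_equal_max_load_items : Prop := ∀ (items : List Int) (capacity : Int), Dom_max_load_items items capacity → Spec_max_load_items items capacity (max_load_items items capacity)

-- ===== LEMMAS AND PROOFS =====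

-- A's loop appends to sel and never reads it back
theorem mlLoopA_append (cap : Int) (s : List Int) : ∀ (t : Int) (sel : List Int),
    mlLoopA cap s t sel = sel ++ mlLoopA cap s t [] := by
  induction s with
  | nil => intro t sel; simp [mlLoopA]
  | cons x xs ih =>
    intro t sel
    simp only [mlLoopA]
    split
    · rw [ih (t + x) (sel ++ [x]), ih (t + x) ([] ++ [x])]; simp
    · simp

-- shifting the running total of A's loop into the capacity
theorem mlLoopA_shift (s : List Int) : ∀ (cap t : Int),
    mlLoopA cap s t [] = mlLoopA (cap - t) s 0 [] := by
  induction s with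
  | nil => intro cap t; simp [mlLoopA]
  | cons x xs ih =>
    intro cap t
    simp only [mlLoopA]
    by_cases h : t + x ≤ cap
    · rw [if_pos h, if_pos (by omega : (0:Int) + x ≤ cap - t)]
      rw [mlLoopA_append cap xs (t + x) ([] ++ [x]),
          mlLoopA_append (cap - t) xs (0 + x) ([] ++ [x]),
          ih cap (t + x), ih (cap - t) (0 + x)]
      have he : cap - (t + x) = cap - t - (0 + x) := by ring
      rw [he]
    · rw [if_neg h, if_neg (by omega : ¬ (0:Int) + x ≤ cap - t)]

-- MAIN INVARIANT: B's selection loop on any pool equals A's loop on the sorted pool.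
theorem mlLoopB_eq (n : Nat) : ∀ (l : List Int), l.length = n → ∀ (cap : Int) (sel : List Int),
    mlLoopB l cap sel = sel ++ mlLoopA cap (PySem.List.sorted l (fun x => x)) 0 [] := by
  induction n with
  | zero =>
    intro l hl cap sel
    have h0 : l = [] := List.length_eq_zero_iff.mp hl
    subst h0
    rw [mlLoopB]
    rw [(PySem.List.min?_eq_none_iff ([] : List Int) (fun x => x)).mpr rfl]
    have hs : PySem.List.sorted ([] : List Int) (fun x => x) = [] :=
      PySem.List.sorted_id_eq_of_perm_of_pairwise [] [] (List.Perm.refl _) (List.Pairwise.nil)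
    rw [hs]; simp [mlLoopA]
  | succ k ih =>
    intro l hl cap sel
    have hne : l ≠ [] := by intro h; subst h; simp at hl
    obtain ⟨m, hm⟩ : ∃ m, PySem.List.min? l (fun x => x) = some m := by
      cases h : PySem.List.min? l (fun x => x) with
      | none => exact absurd ((PySem.List.min?_eq_none_iff l (fun x => x)).mp h) hne
      | some m => exact ⟨m, rfl⟩
    have hmem : m ∈ l := PySem.List.min?_mem hm
    have hmin : ∀ y ∈ l, m ≤ y := fun y hy => PySem.List.min?_isMin hm y hy
    -- the sorted pool is m followed by the sorted erased pool
    have hperm : (m :: PySem.List.sorted (l.erase m) (fun x => x)).Perm l := by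
      have p1 : (m :: PySem.List.sorted (l.erase m) (fun x => x)).Perm (m :: l.erase m) :=
        List.Perm.cons m (PySem.List.sorted_perm _ _ _)
      exact p1.trans (List.perm_cons_erase hmem).symm
    have hsorted : PySem.List.sorted l (fun x => x)
        = m :: PySem.List.sorted (l.erase m) (fun x => x) := by
      apply PySem.List.sorted_id_eq_of_perm_of_pairwise _ _ hperm
      refine List.pairwise_cons.mpr ⟨?_, PySem.List.sorted_pairwise _ _⟩
      intro y hy
      have hyl : y ∈ l.erase m := (PySem.List.mem_sorted _ _ _ _).mp hy
      exact hmin y (List.mem_of_mem_erase hyl)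
    have hre : PySem.List.remove? l m = some (l.erase m) :=
      PySem.List.remove?_eq_some_erase l m hmem
    rw [mlLoopB, hm]
    dsimp only
    by_cases hc : m > cap
    · rw [if_pos hc, hsorted]
      simp only [mlLoopA]
      rw [if_neg (by omega : ¬ (0:Int) + m ≤ cap)]
      simp
    · rw [if_neg hc, hre]
      dsimp only
      have hlen : (l.erase m).length = k := by
        have := List.length_erase_of_mem hmem
        have := List.length_pos_of_mem hmem
        omega
      rw [ih (l.erase m) hlen (cap - m) (sel ++ [m])]
      rw [hsorted]
      simp only [mlLoopA]
      rw [if_pos (by omega : (0:Int) + m ≤ cap)]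
      rw [mlLoopA_append cap _ (0 + m) ([] ++ [m]), mlLoopA_shift _ cap (0 + m)]
      have he : cap - (0 + m) = cap - m := by ring
      rw [he]
      simp

-- ===== VERDICT (by name: the statement is the Claim_ definition above) =====
theorem max_load_items_spec : Claim_equal_max_load_items := by
  intro items capacity _
  unfold Spec_max_load_items max_load_items max_load_items_alt
  rw [mlLoopB_eq items.length items rfl capacity []]
  simp
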